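-- pv_equiv track=rewrite | github.com/sky09998/AI-Resume-Cover-Feedback | gptchecker/views.py | pretty_print_feedback
-- ===== SOURCE A (Python) =====
-- def pretty_print_feedback(feedback_str):
--     formatted_feedback = '<div class="feedback">'
--     lines = feedback_str.split('\n')
--     in_list = False  # Track if we're inside a list
--
--     for line in lines:
--         if line.strip():
--             # Manage list items
--             if line.startswith('* '):
--                 # Start a new list if not already in one
--                 if not in_list:
--                     in_list = True
--                     formatted_feedback += '<ul>'
--                 line_content = line.replace('* ', '', 1).strip()
--                 # Handle bold within list items
--                 line_content = handle_bold(line_content)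
--                 formatted_feedback += f'<li>{line_content}</li>'
--             else:
--                 # Close the list if one was open
--                 if in_list:
--                     formatted_feedback += '</ul>'
--                     in_list = False
--                 # Handle bold without bullet
--                 line_content = handle_bold(line)
--                 formatted_feedback += f'<p>{line_content}</p>'
--     # Ensure to close any open list tags
--     if in_list:
--         formatted_feedback += '</ul>'
--     formatted_feedback += '</div>'
--     return formatted_feedback
--
-- def handle_bold(text):
--     """Handles toggling of bold formatting within a text based on '**'."""
--     if '**' in text:
--         # Split the text at each '**' and toggle bolding
--         parts = text.split('**')
--         bold = False
--         result = ""
--         for part in parts: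
--             if bold:
--                 result += f'<b>{part}</b>'
--             else:
--                 result += part
--             bold = not bold  # Toggle bolding
--         return result
--     else:
--         return text
-- ===== SOURCE B (Python) =====
-- def pretty_print_feedback(feedback_str):
--     # Filter out blank lines once, then scan block by block: a run of '* ' lines
--     # becomes one <ul> block built in a single join; other lines become <p> tags.
--     lines = [l for l in feedback_str.split('\n') if l.strip()]
--     out = ['<div class="feedback">']
--     i = 0
--     n = len(lines)
--     while i < n:
--         if lines[i].startswith('* '):
--             j = i
--             while j < n and lines[j].startswith('* '):
--                 j += 1
--             items = ''.join(f'<li>{handle_bold(l[2:].strip())}</li>' for l in lines[i:j])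
--             out.append(f'<ul>{items}</ul>')
--             i = j
--         else:
--             out.append(f'<p>{handle_bold(lines[i])}</p>')
--             i += 1
--     out.append('</div>')
--     return ''.join(out)
--
--
-- def handle_bold(text):
--     """Handles toggling of bold formatting within a text based on '**'."""
--     if '**' in text:
--         parts = text.split('**')
--         bold = False
--         result = ""
--         for part in parts:
--             if bold:
--                 result += f'<b>{part}</b>'
--             else:
--                 result += part
--             bold = not bold
--         return result
--     else:
--         return text
-- ===== Notes on version B (the rewrite author's own statement) =====
-- stated objective: alternative
-- what changed: Replaces A's single pass that threads an in_list boolean through every line with a filter-then-block scan: blank lines are removed up front, each maximal run of bullet lines is consumed as one span and emitted as a complete <ul> block by a join, so no open-list state crosses iterations.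
import Mathlib
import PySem

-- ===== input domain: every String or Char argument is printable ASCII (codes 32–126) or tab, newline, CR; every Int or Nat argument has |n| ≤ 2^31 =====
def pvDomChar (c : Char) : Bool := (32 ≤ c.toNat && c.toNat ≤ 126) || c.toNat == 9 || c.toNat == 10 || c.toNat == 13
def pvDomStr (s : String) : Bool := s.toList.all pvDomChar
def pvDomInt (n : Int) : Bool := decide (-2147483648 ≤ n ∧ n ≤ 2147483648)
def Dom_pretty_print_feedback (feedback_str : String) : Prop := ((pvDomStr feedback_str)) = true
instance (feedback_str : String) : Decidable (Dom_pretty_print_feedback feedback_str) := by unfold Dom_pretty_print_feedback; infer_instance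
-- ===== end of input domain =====

-- B replaces A's line-by-line loop threading an in_list flag by a filter-then-block scan
-- (blank lines removed first, runs of '* ' lines emitted as whole <ul> blocks); same output.


-- ===== PORT A =====
-- handle_bold, identical helper in Source A and Source B, ported on List Char
def handleBoldC (text : List Char) : List Char :=
  if PySem.Chars.isIn "**".toList text then
    (("<b>".toList, "</b>".toList) |> fun _ =>
      ((PySem.Chars.splitOn text "**".toList).foldl
        (fun (st : List Char × Bool) part =>
          ((if st.2 then st.1 ++ "<b>".toList ++ part ++ "</b>".toList else st.1 ++ part), !st.2))
        ([], false)).1)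
  else text

-- line.replace('* ', '', 1): remove the FIRST occurrence of "* " (exact hand port; identity if absent)
def pvReplaceFirstStarSpace : List Char → List Char
  | '*' :: ' ' :: rest => rest
  | c :: rest => c :: pvReplaceFirstStarSpace rest
  | [] => []

-- the body of A's for-loop, state = (formatted_feedback, in_list)
def pvStepA (st : List Char × Bool) (line : List Char) : List Char × Bool :=
  if (PySem.Chars.strip line).isEmpty = false then
    if PySem.Chars.startswith line "* ".toList then
      let st1 : List Char × Bool := if !st.2 then (st.1 ++ "<ul>".toList, true) else st
      let content := handleBoldC (PySem.Chars.strip (pvReplaceFirstStarSpace line))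
      (st1.1 ++ "<li>".toList ++ content ++ "</li>".toList, st1.2)
    else
      let st1 : List Char × Bool := if st.2 then (st.1 ++ "</ul>".toList, false) else st
      (st1.1 ++ "<p>".toList ++ handleBoldC line ++ "</p>".toList, st1.2)
  else st

-- the trailing "if in_list: formatted_feedback += '</ul>'"
def pvFinishA (r : List Char × Bool) : List Char :=
  if r.2 then r.1 ++ "</ul>".toList else r.1

def pretty_print_feedback (feedback_str : String) : String :=
  let lines := PySem.Chars.splitOn feedback_str.toList "\n".toList
  String.ofList
    (pvFinishA (lines.foldl pvStepA ("<div class=\"feedback\">".toList, false)) ++ "</div>".toList)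

-- ===== PORT B =====
def pvIsBullet (l : List Char) : Bool := PySem.Chars.startswith l "* ".toList

-- f'<li>{handle_bold(l[2:].strip())}</li>'  (l[2:] on a line is drop 2: Python slices clamp, exact)
def pvLiB (l : List Char) : List Char :=
  "<li>".toList ++ handleBoldC (PySem.Chars.strip (l.drop 2)) ++ "</li>".toList

-- the while-loop over the filtered lines: a run of bullet lines becomes one <ul> block,
-- any other line becomes one <p> block (lines[i:j] = the takeWhile span, i = j jumps past it)
def pvRenderBlocks : List (List Char) → List Char
  | [] => []
  | l :: rest =>
    if pvIsBullet l then
      "<ul>".toList ++ ((l :: rest.takeWhile pvIsBullet).map pvLiB).flatten ++ "</ul>".toList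
        ++ pvRenderBlocks (rest.dropWhile pvIsBullet)
    else
      "<p>".toList ++ handleBoldC l ++ "</p>".toList ++ pvRenderBlocks rest
termination_by ls => ls.length
decreasing_by
  · have := List.length_dropWhile_le pvIsBullet rest; simp; omega
  · simp

def pretty_print_feedback_alt (feedback_str : String) : String :=
  let lines := (PySem.Chars.splitOn feedback_str.toList "\n".toList).filter
    (fun l => !(PySem.Chars.strip l).isEmpty)
  String.ofList ("<div class=\"feedback\">".toList ++ pvRenderBlocks lines ++ "</div>".toList)

-- ===== PRECONDITION & SPEC =====
def Spec_pretty_print_feedback (feedback_str : String) (out : String) : Prop := out = pretty_print_feedback_alt feedback_str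
instance (feedback_str : String) (out : String) : Decidable (Spec_pretty_print_feedback feedback_str out) := by unfold Spec_pretty_print_feedback; infer_instance

-- ===== CLAIM (what is proved, stated in full; the proofs are below) =====
def Claim_equal_pretty_print_feedback : Prop := ∀ (feedback_str : String), Dom_pretty_print_feedback feedback_str → Spec_pretty_print_feedback feedback_str (pretty_print_feedback feedback_str)

-- ===== LEMMAS AND PROOFS =====

-- A's per-line emissions, as functions of the line
def pvLiA (l : List Char) : List Char :=
  "<li>".toList ++ handleBoldC (PySem.Chars.strip (pvReplaceFirstStarSpace l)) ++ "</li>".toList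

def pvPTag (l : List Char) : List Char :=
  "<p>".toList ++ handleBoldC l ++ "</p>".toList

-- A's loop restated as structural recursion over the (already blank-filtered) lines,
-- with the in_list flag as an argument
def pvRenderR : Bool → List (List Char) → List Char
  | fl, [] => if fl then "</ul>".toList else []
  | fl, l :: rest =>
    if pvIsBullet l then
      (if fl then [] else "<ul>".toList) ++ pvLiA l ++ pvRenderR true rest
    else
      (if fl then "</ul>".toList else []) ++ pvPTag l ++ pvRenderR false rest

lemma pvLiA_eq_pvLiB (l : List Char) (h : pvIsBullet l = true) : pvLiA l = pvLiB l := by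
  obtain ⟨t, rfl⟩ := (PySem.Chars.startswith_iff l "* ".toList).1 h
  simp [pvLiA, pvLiB]
  rfl

-- the A-side loop invariant
lemma pvLoopA (ls : List (List Char)) : ∀ (acc : List Char) (fl : Bool),
    pvFinishA (ls.foldl pvStepA (acc, fl))
      = acc ++ pvRenderR fl (ls.filter (fun l => !(PySem.Chars.strip l).isEmpty)) := by
  induction ls with
  | nil => intro acc fl; cases fl <;> simp [pvFinishA, pvRenderR]
  | cons l rest ih =>
    intro acc fl
    by_cases hs : (PySem.Chars.strip l).isEmpty = true
    · simp [List.foldl_cons, pvStepA, hs, ih]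
    · have hs' : (PySem.Chars.strip l).isEmpty = false := by simpa using hs
      by_cases hb : pvIsBullet l = true
      · have hb2 : PySem.Chars.startswith l ['*', ' '] = true := hb
        cases fl <;>
          simp [List.foldl_cons, pvStepA, hs', hb2, ih, pvRenderR,
            pvIsBullet, pvLiA, List.append_assoc]
      · have hb' : pvIsBullet l = false := by simpa using hb
        cases fl <;>
          simp_all [List.foldl_cons, pvStepA, pvIsBullet, pvRenderR, pvPTag, List.append_assoc]

-- the B-side block scan equals A's recursion (strong induction on length, with the
-- open-list invariant as second conjunct)
lemma pvBlocks_eq (n : Nat) : ∀ ls : List (List Char), ls.length ≤ n →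
    pvRenderBlocks ls = pvRenderR false ls ∧
    pvRenderR true ls = ((ls.takeWhile pvIsBullet).map pvLiA).flatten ++ "</ul>".toList
        ++ pvRenderBlocks (ls.dropWhile pvIsBullet) := by
  induction n with
  | zero =>
    intro ls h
    have : ls = [] := List.eq_nil_of_length_eq_zero (Nat.le_zero.mp h)
    subst this
    simp [pvRenderBlocks, pvRenderR]
  | succ n ih =>
    intro ls h
    cases ls with
    | nil => simp [pvRenderBlocks, pvRenderR]
    | cons l rest =>
      have hr : rest.length ≤ n := by simpa using h
      have hd : (rest.dropWhile pvIsBullet).length ≤ n := by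
        have := List.length_dropWhile_le pvIsBullet rest; omega
      by_cases hb : pvIsBullet l = true
      · have hmap : (rest.takeWhile pvIsBullet).map pvLiA = (rest.takeWhile pvIsBullet).map pvLiB := by
          apply List.map_congr_left
          intro x hx
          exact pvLiA_eq_pvLiB x (List.mem_takeWhile_imp hx)
        constructor
        · rw [pvRenderBlocks]
          simp only [hb, if_true]
          rw [pvRenderR]
          simp only [hb, if_true]
          rw [(ih rest hr).2, pvLiA_eq_pvLiB l hb, hmap]
          simp [List.append_assoc]
        · rw [pvRenderR]
          simp only [hb, if_true]
          rw [(ih rest hr).2]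
          simp [hb, List.append_assoc]
      · have hb' : pvIsBullet l = false := by simpa using hb
        constructor
        · rw [pvRenderBlocks, pvRenderR]
          simp only [hb', if_false, Bool.false_eq_true]
          rw [(ih rest hr).1]
          simp [pvPTag, List.append_assoc]
        · rw [pvRenderR]
          have hblocks : pvRenderBlocks (l :: rest)
              = "<p>".toList ++ handleBoldC l ++ "</p>".toList ++ pvRenderBlocks rest := by
            rw [pvRenderBlocks]; simp [hb']
          simp [hb', hblocks, ← (ih rest hr).1, pvPTag, List.append_assoc]

-- ===== VERDICT (by name: the statement is the Claim_ definition above) =====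
theorem pretty_print_feedback_spec : Claim_equal_pretty_print_feedback := by
  intro s _
  show String.ofList
      (pvFinishA ((PySem.Chars.splitOn s.toList "\n".toList).foldl pvStepA
        ("<div class=\"feedback\">".toList, false)) ++ "</div>".toList)
    = String.ofList ("<div class=\"feedback\">".toList
        ++ pvRenderBlocks ((PySem.Chars.splitOn s.toList "\n".toList).filter
            (fun l => !(PySem.Chars.strip l).isEmpty)) ++ "</div>".toList)
  rw [pvLoopA,
    (pvBlocks_eq _ _ (le_refl ((PySem.Chars.splitOn s.toList "\n".toList).filter
      (fun l => !(PySem.Chars.strip l).isEmpty)).length)).1]
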